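-- pv_equiv track=rewrite | github.com/neilb14/advent-of-code | day3/solution.py | calculate_square
-- ===== SOURCE A (Python) =====
-- def increment(x):
--     return x+1
--
-- def decrement(x):
--     return x-1
--
-- def calculate_square(size):
--     results = []
--     max_r = size - 1
--     min_r = int(size/2)
--     r = max_r - 1
--     f = decrement
--     for i in range(0, (size*2) + (size-2)*2):
--         results.append(r)
--         if r >= max_r:
--             f = decrement
--         elif r <= min_r:
--             f = increment
--         r = f(r)
--     return results
-- ===== SOURCE B (Python) =====
-- def calculate_square(size):
--     n = 4 * size - 4
--     if n <= 0:
--         return []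
--     if size == 2:
--         return [i % 2 for i in range(n)]
--     max_r = size - 1
--     min_r = size // 2
--     amp = max_r - min_r
--     p = 2 * amp
--     return [max_r - 1 - i % p if i % p < amp else min_r + 1 + (i % p - amp)
--             for i in range(n)]
-- ===== Notes on version B (the rewrite author's own statement) =====
-- stated objective: simpler
-- what changed: Replaces A's stateful loop (direction function switched at the wave's extremes, one step per iteration) with a per-index closed-form triangle wave of period 2*(max_r-min_r), plus a direct special case for size==2 and an empty-range early return.
import Mathlib
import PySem

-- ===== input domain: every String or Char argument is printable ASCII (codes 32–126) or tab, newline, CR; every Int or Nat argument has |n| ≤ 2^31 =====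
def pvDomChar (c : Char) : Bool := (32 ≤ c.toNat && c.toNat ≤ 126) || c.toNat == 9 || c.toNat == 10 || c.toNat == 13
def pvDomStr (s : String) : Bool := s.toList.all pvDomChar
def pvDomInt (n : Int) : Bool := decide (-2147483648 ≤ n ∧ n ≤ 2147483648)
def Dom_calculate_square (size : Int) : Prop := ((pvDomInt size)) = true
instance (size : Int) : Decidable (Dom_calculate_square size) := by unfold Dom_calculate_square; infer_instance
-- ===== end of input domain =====

-- B replaces A's stateful direction-switching loop by a per-index closed form of the
-- triangle wave (period 2*(max_r - min_r)); objective: simpler, same cost.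

-- ===== PORT A =====
def increment (x : Int) : Int := x + 1
def decrement (x : Int) : Int := x - 1

-- one iteration of A's loop body over the state (results, r, f)
def calcStep (max_r min_r : Int) (st : List Int × Int × (Int → Int)) : List Int × Int × (Int → Int) :=
  let results := st.1 ++ [st.2.1]
  let f := if st.2.1 ≥ max_r then decrement else if st.2.1 ≤ min_r then increment else st.2.2
  (results, f st.2.1, f)

def calculate_square (size : Int) : List Int :=
  let max_r := size - 1
  -- int(size/2): float division is exact for |size| ≤ 2^31 < 2^53 and int() truncates toward zero
  let min_r := PySem.Int.truncdiv size 2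
  let st := (PySem.List.pyRange 0 (size * 2 + (size - 2) * 2) 1).foldl
    (fun st _ => calcStep max_r min_r st) ([], max_r - 1, decrement)
  st.1

-- ===== PORT B =====
def calculate_square_alt (size : Int) : List Int :=
  let n := 4 * size - 4
  if n ≤ 0 then []
  else if size = 2 then (PySem.List.pyRange 0 n 1).map (fun i => PySem.Int.mod i 2)
  else
    let max_r := size - 1
    let min_r := PySem.Int.floordiv size 2
    let amp := max_r - min_r
    let p := 2 * amp
    (PySem.List.pyRange 0 n 1).map (fun i =>
      if PySem.Int.mod i p < amp then max_r - 1 - PySem.Int.mod i p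
      else min_r + 1 + (PySem.Int.mod i p - amp))

-- ===== PRECONDITION & SPEC =====
def Spec_calculate_square (size : Int) (out : List Int) : Prop := out = calculate_square_alt size
instance (size : Int) (out : List Int) : Decidable (Spec_calculate_square size out) := by unfold Spec_calculate_square; infer_instance

-- ===== CLAIM (what is proved, stated in full; the proofs are below) =====
def Claim_equal_calculate_square : Prop := ∀ (size : Int), Dom_calculate_square size → Spec_calculate_square size (calculate_square size)

-- ===== LEMMAS AND PROOFS =====

-- the triangle wave B evaluates at phase t (t = i % (2*amp))
def wave (M m amp t : Int) : Int := if t < amp then M - 1 - t else m + 1 + (t - amp)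

-- successor of a phase value
theorem emod_succ (a n : Int) (hn : 0 < n) :
    (a + 1) % n = if a % n + 1 = n then 0 else a % n + 1 := by
  have h : (a + 1) % n = (a % n + 1) % n := by
    conv_lhs => rw [← Int.emod_add_mul_ediv a n]
    rw [add_right_comm, Int.add_mul_emod_self_left]
  have h1 : 0 ≤ a % n := Int.emod_nonneg a (by omega)
  have h2 : a % n < n := Int.emod_lt_of_pos a hn
  rw [h]
  split_ifs with he
  · rw [he, Int.emod_self]
  · exact Int.emod_eq_of_lt (by omega) (by omega)

-- A's loop, from its initial state, computes the wave at every index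
theorem loop_inv (M m amp : Int) (hamp : 1 ≤ amp) (hM : M = m + amp) (k : Nat) :
    ((List.range k).map (Int.ofNat)).foldl (fun st _ => calcStep M m st) ([], M - 1, decrement)
    = ((List.range k).map (fun i : Nat => wave M m amp ((i : Int) % (2 * amp))),
       wave M m amp ((k : Int) % (2 * amp)),
       if ((k : Int) % (2 * amp)) < amp then decrement else increment) := by
  induction k with
  | zero =>
    simp [wave, if_pos (by omega : (0:Int) < amp)]
  | succ k ih =>
    rw [List.range_succ, List.map_append, List.map_append, List.foldl_append, ih]
    have hp : (0:Int) < 2 * amp := by omega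
    have ht0 : 0 ≤ (k : Int) % (2 * amp) := Int.emod_nonneg _ (by omega)
    have ht1 : (k : Int) % (2 * amp) < 2 * amp := Int.emod_lt_of_pos _ hp
    have hs : ((k : Int) + 1) % (2 * amp) =
        if (k : Int) % (2 * amp) + 1 = 2 * amp then 0 else (k : Int) % (2 * amp) + 1 :=
      emod_succ _ _ hp
    have hc : ((k + 1 : Nat) : Int) = (k : Int) + 1 := by push_cast; ring
    simp only [List.map_cons, List.map_nil, List.foldl_cons, List.foldl_nil, calcStep]
    rw [hc, hs]
    by_cases hend : (k : Int) % (2 * amp) + 1 = 2 * amp <;>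
      [rw [if_pos hend]; rw [if_neg hend]] <;>
      refine Prod.ext rfl (Prod.ext ?_ ?_) <;>
      simp only [wave] <;>
      split_ifs <;> (try simp only [increment, decrement]) <;>
      first | rfl | omega

-- A as a map of the wave, for size ≥ 3
theorem calcA_eq (size : Int) (h3 : 3 ≤ size) :
    calculate_square size
    = (PySem.List.pyRange 0 (4 * size - 4) 1).map
        (fun i => wave (size - 1) (size / 2) (size - 1 - size / 2) (i % (2 * (size - 1 - size / 2)))) := by
  have htd : PySem.Int.truncdiv size 2 = size / 2 := by
    simp [PySem.Int.truncdiv, Int.tdiv_eq_ediv_of_nonneg (by omega : (0:Int) ≤ size)]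
  have hn : size * 2 + (size - 2) * 2 = 4 * size - 4 := by ring
  have hamp : 1 ≤ size - 1 - size / 2 := by omega
  have hM : size - 1 = size / 2 + (size - 1 - size / 2) := by omega
  have hrange : PySem.List.pyRange 0 (4 * size - 4) 1
      = (List.range (4 * size - 4).toNat).map (Int.ofNat) := by
    rw [PySem.List.pyRange_one]
    simp
  simp only [calculate_square, htd, hn, hrange]
  rw [loop_inv (size - 1) (size / 2) (size - 1 - size / 2) hamp hM]
  rw [List.map_map]
  rfl

theorem main_eq (size : Int) (hdom : Dom_calculate_square size) :
    calculate_square size = calculate_square_alt size := by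
  rcases lt_or_ge size 2 with h1 | h2
  · -- size ≤ 1: both loops are empty
    have hA : PySem.List.pyRange 0 (size * 2 + (size - 2) * 2) 1 = [] :=
      PySem.List.pyRange_one_eq_nil (by omega)
    simp only [calculate_square, calculate_square_alt, hA, List.foldl_nil]
    split_ifs with hb h2
    · rfl
    · exact absurd hb (by omega)
    · exact absurd hb (by omega)
  · rcases eq_or_lt_of_le h2 with h2' | h3
    · subst h2'; decide
    · -- size ≥ 3
      have h3 : 3 ≤ size := by omega
      rw [calcA_eq size h3]
      unfold calculate_square_alt
      rw [if_neg (by omega), if_neg (by omega)]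
      have hfd : PySem.Int.floordiv size 2 = size / 2 :=
        PySem.Int.floordiv_eq_ediv_of_pos (by omega)
      simp only [hfd]
      apply List.map_congr_left
      intro i hi
      have hi0 : 0 ≤ i := (PySem.List.mem_pyRange_one.mp hi).1
      have hp : (0:Int) < 2 * (size - 1 - size / 2) := by omega
      rw [PySem.Int.mod_eq_emod_of_pos hp]
      rfl

-- ===== VERDICT (by name: the statement is the Claim_ definition above) =====
theorem calculate_square_spec : Claim_equal_calculate_square := by
  intro size hdom
  unfold Spec_calculate_square
  exact main_eq size hdom
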